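-- pv_equiv track=rewrite | github.com/shree1892001/DocumenttExtractor | Services/DocumenProcessor2.py | _analyze_special_characters
-- ===== SOURCE A (Python) =====
-- from typing import List, Dict, Any, Optional, Tuple
--
-- def _analyze_special_characters(text: str) -> Dict[str, Any]:
--     """Analyze special characters"""
--     special = {
--         'punctuation': 0,
--         'symbols': 0,
--         'whitespace': 0
--     }
--
--     for char in text:
--         if char in '.,;:!?':
--             special['punctuation'] += 1
--         elif char in '@#$%^&*()_+-=[]{}|\\;:"\'<>,.?/~`':
--             special['symbols'] += 1
--         elif char.isspace():
--             special['whitespace'] += 1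
--
--     return special
-- ===== SOURCE B (Python) =====
-- PUNCTUATION = set('.,;:!?')
-- SYMBOLS = set('@#$%^&*()_+-=[]{}|\\;:"\'<>,.?/~`') - PUNCTUATION
--
-- def _analyze_special_characters(text: str):
--     """Analyze special characters"""
--     return {
--         'punctuation': sum(ch in PUNCTUATION for ch in text),
--         'symbols': sum(ch in SYMBOLS for ch in text),
--         'whitespace': sum(ch.isspace() for ch in text),
--     }
-- ===== Notes on version B (the rewrite author's own statement) =====
-- stated objective: idiomatic
-- what changed: Replaces the single loop with a mutated dict and an elif chain by three independent 0/1-sum comprehensions over precomputed character sets, with the elif priority folded into a set difference computed once.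
import Mathlib
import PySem

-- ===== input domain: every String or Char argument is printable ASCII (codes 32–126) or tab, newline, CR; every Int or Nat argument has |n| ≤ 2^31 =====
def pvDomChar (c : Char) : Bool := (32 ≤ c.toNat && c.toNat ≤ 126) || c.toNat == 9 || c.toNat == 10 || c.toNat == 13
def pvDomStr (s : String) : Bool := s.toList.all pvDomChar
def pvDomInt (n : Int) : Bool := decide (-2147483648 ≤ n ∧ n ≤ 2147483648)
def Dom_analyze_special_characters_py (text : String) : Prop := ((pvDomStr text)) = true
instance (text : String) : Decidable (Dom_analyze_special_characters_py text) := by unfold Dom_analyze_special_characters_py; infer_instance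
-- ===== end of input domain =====

-- B replaces A's single loop + mutated dict + elif chain by three independent 0/1-sums over
-- precomputed character sets (the elif priority becomes a set difference computed once); same cost.

-- ===== PORT A =====
def pvPunctChars : List Char := ['.', ',', ';', ':', '!', '?']
def pvSymbChars : List Char :=
  ['@', '#', '$', '%', '^', '&', '*', '(', ')', '_', '+', '-', '=', '[', ']', '{', '}',
   '|', '\\', ';', ':', '"', '\'', '<', '>', ',', '.', '?', '/', '~', '`']

def pvStepA (special : PySem.Dict String Int) (char : Char) : PySem.Dict String Int :=
  if char ∈ pvPunctChars then special.modify "punctuation" 0 (· + 1)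
  else if char ∈ pvSymbChars then special.modify "symbols" 0 (· + 1)
  else if PySem.Chars.isspace char then special.modify "whitespace" 0 (· + 1)
  else special

def analyze_special_characters_py (text : String) : List (String × Int) :=
  (text.toList.foldl pvStepA
    (PySem.Dict.ofList [("punctuation", 0), ("symbols", 0), ("whitespace", 0)])).items

-- ===== PORT B =====
def pvPunctSet : PySem.Set Char := PySem.Set.ofList ['.', ',', ';', ':', '!', '?']
def pvSymbSet : PySem.Set Char :=
  PySem.Set.diff (PySem.Set.ofList
    ['@', '#', '$', '%', '^', '&', '*', '(', ')', '_', '+', '-', '=', '[', ']', '{', '}',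
     '|', '\\', ';', ':', '"', '\'', '<', '>', ',', '.', '?', '/', '~', '`']) pvPunctSet

def analyze_special_characters_py_alt (text : String) : List (String × Int) :=
  [("punctuation", (text.toList.map (fun ch => if PySem.Set.contains pvPunctSet ch then (1 : Int) else 0)).sum),
   ("symbols", (text.toList.map (fun ch => if PySem.Set.contains pvSymbSet ch then (1 : Int) else 0)).sum),
   ("whitespace", (text.toList.map (fun ch => if PySem.Chars.isspace ch then (1 : Int) else 0)).sum)]

-- ===== PRECONDITION & SPEC =====
def Spec_analyze_special_characters_py (text : String) (out : List (String × Int)) : Prop := out = analyze_special_characters_py_alt text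
instance (text : String) (out : List (String × Int)) : Decidable (Spec_analyze_special_characters_py text out) := by unfold Spec_analyze_special_characters_py; infer_instance

-- ===== CLAIM (what is proved, stated in full; the proofs are below) =====
def Claim_equal_analyze_special_characters_py : Prop := ∀ (text : String), Dom_analyze_special_characters_py text → Spec_analyze_special_characters_py text (analyze_special_characters_py text)

-- ===== LEMMAS AND PROOFS =====

lemma pv_punct_not_space {c : Char} (h : c ∈ pvPunctChars) : PySem.Chars.isspace c = false := by
  simp [pvPunctChars] at h
  rcases h with rfl | rfl | rfl | rfl | rfl | rfl <;> decide

lemma pv_symb_not_space {c : Char} (h : c ∈ pvSymbChars) : PySem.Chars.isspace c = false := by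
  simp [pvSymbChars] at h
  rcases h with rfl|rfl|rfl|rfl|rfl|rfl|rfl|rfl|rfl|rfl|rfl|rfl|rfl|rfl|rfl|rfl|rfl|rfl|rfl|rfl|rfl|rfl|rfl|rfl|rfl|rfl|rfl|rfl|rfl|rfl|rfl <;> decide

lemma pv_contains_punct (c : Char) : PySem.Set.contains pvPunctSet c = true ↔ c ∈ pvPunctChars := by
  simp [pvPunctSet, PySem.Set.contains, PySem.Set.mem_ofList, pvPunctChars]

lemma pv_contains_symb (c : Char) : PySem.Set.contains pvSymbSet c = true ↔ (c ∈ pvSymbChars ∧ c ∉ pvPunctChars) := by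
  simp [pvSymbSet, PySem.Set.diff, PySem.Set.contains, List.mem_filter,
        PySem.Set.mem_ofList, pvSymbChars, pvPunctSet, pvPunctChars]

lemma pv_modify_p (p s w : Int) :
    (PySem.Dict.mk [("punctuation", p), ("symbols", s), ("whitespace", w)]).modify "punctuation" 0 (· + 1)
      = PySem.Dict.mk [("punctuation", p + 1), ("symbols", s), ("whitespace", w)] := rfl

lemma pv_modify_s (p s w : Int) :
    (PySem.Dict.mk [("punctuation", p), ("symbols", s), ("whitespace", w)]).modify "symbols" 0 (· + 1)
      = PySem.Dict.mk [("punctuation", p), ("symbols", s + 1), ("whitespace", w)] := rfl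

lemma pv_modify_w (p s w : Int) :
    (PySem.Dict.mk [("punctuation", p), ("symbols", s), ("whitespace", w)]).modify "whitespace" 0 (· + 1)
      = PySem.Dict.mk [("punctuation", p), ("symbols", s), ("whitespace", w + 1)] := rfl

lemma pv_loop (cs : List Char) (p s w : Int) :
    (cs.foldl pvStepA (PySem.Dict.mk [("punctuation", p), ("symbols", s), ("whitespace", w)])).items
      = [("punctuation", p + (cs.map (fun ch => if PySem.Set.contains pvPunctSet ch then (1 : Int) else 0)).sum),
         ("symbols", s + (cs.map (fun ch => if PySem.Set.contains pvSymbSet ch then (1 : Int) else 0)).sum),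
         ("whitespace", w + (cs.map (fun ch => if PySem.Chars.isspace ch then (1 : Int) else 0)).sum)] := by
  induction cs generalizing p s w with
  | nil => simp
  | cons c cs ih =>
    simp only [List.foldl_cons, List.map_cons, List.sum_cons]
    by_cases hp : c ∈ pvPunctChars
    · have h1 : PySem.Set.contains pvPunctSet c = true := (pv_contains_punct c).mpr hp
      have h2 : PySem.Set.contains pvSymbSet c = false := by
        rw [Bool.eq_false_iff]; intro h; exact ((pv_contains_symb c).mp h).2 hp
      have h3 := pv_punct_not_space hp
      rw [pvStepA, if_pos hp, pv_modify_p, ih, h1, h2, h3]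
      simp [add_assoc]
    · by_cases hs : c ∈ pvSymbChars
      · have h1 : PySem.Set.contains pvPunctSet c = false := by
          rw [Bool.eq_false_iff]; intro h; exact hp ((pv_contains_punct c).mp h)
        have h2 : PySem.Set.contains pvSymbSet c = true := (pv_contains_symb c).mpr ⟨hs, hp⟩
        have h3 := pv_symb_not_space hs
        rw [pvStepA, if_neg hp, if_pos hs, pv_modify_s, ih, h1, h2, h3]
        simp [add_assoc]
      · have h1 : PySem.Set.contains pvPunctSet c = false := by
          rw [Bool.eq_false_iff]; intro h; exact hp ((pv_contains_punct c).mp h)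
        have h2 : PySem.Set.contains pvSymbSet c = false := by
          rw [Bool.eq_false_iff]; intro h; exact hs ((pv_contains_symb c).mp h).1
        rw [pvStepA, if_neg hp, if_neg hs]
        by_cases hw : PySem.Chars.isspace c = true
        · rw [if_pos hw, pv_modify_w, ih, h1, h2, hw]
          simp [add_assoc]
        · rw [if_neg hw, ih, h1, h2, Bool.eq_false_iff.mpr hw]
          simp

-- ===== VERDICT (by name: the statement is the Claim_ definition above) =====
theorem analyze_special_characters_py_spec : Claim_equal_analyze_special_characters_py := by
  intro text _
  show _ = _
  unfold analyze_special_characters_py analyze_special_characters_py_alt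
  have h0 : PySem.Dict.ofList [("punctuation", (0:Int)), ("symbols", 0), ("whitespace", 0)]
      = PySem.Dict.mk [("punctuation", 0), ("symbols", 0), ("whitespace", 0)] := by decide
  rw [h0, pv_loop]
  simp
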